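-- pv_equiv track=rewrite | github.com/plaaxer/parsers-generator | src/scanner_framework/regex_processor.py | _expand_char_classes
-- ===== SOURCE A (Python) =====
-- def _expand_char_classes(regex: str) -> str:
--     """
--     Transforma expressões de classe de caracteres como [a-zA-Z0-9] em
--     (a|b|...|z|A|B|...|Z|0|1|...|9). Suporta múltiplos intervalos e caracteres isolados.
--     """
--     i = 0
--     expanded = []
--     n = len(regex)
--
--     while i < n:
--         if regex[i] == '[':
--             j = i + 1
--             while j < n and regex[j] != ']':
--                 j += 1
--             if j >= n:
--                 raise ValueError(f"Char class was not closed in: {regex[i:]}")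
--             class_body = regex[i+1:j]
--             chars = []
--             k = 0
--             while k < len(class_body):
--                 if (k + 2 < len(class_body)) and (class_body[k+1] == '-'):
--                     start_char = class_body[k]
--                     end_char = class_body[k+2]
--                     for code in range(ord(start_char), ord(end_char) + 1):
--                         chars.append(chr(code))
--                     k += 3
--                 else:
--                     chars.append(class_body[k])
--                     k += 1
--             seen = set()
--             unique_chars = []
--             for c in chars:
--                 if c not in seen:
--                     seen.add(c)
--                     unique_chars.append(c)
--             union_expr = "(" + "|".join(unique_chars) + ")"
--             expanded.append(union_expr)
--             i = j + 1
--         else: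
--             expanded.append(regex[i])
--             i += 1
--
--     return "".join(expanded)
-- ===== SOURCE B (Python) =====
-- def _expand_char_classes(regex: str) -> str:
--     """Expand [..] char classes into (a|b|...) alternations.
--
--     Re-implementation: instead of an index-driven while loop, split the string
--     with str.partition around the class delimiters and recurse on the tail;
--     the class body is first tokenized into (start, end) pairs (a single char c
--     becomes (c, c)), then expanded uniformly and deduplicated with dict.fromkeys.
--     """
--     head, sep, tail = regex.partition('[')
--     if not sep:
--         return regex
--     body, sep2, rest = tail.partition(']')
--     if not sep2:
--         raise ValueError(f"Char class was not closed in: [{tail}")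
--     tokens = []
--     while body:
--         if len(body) >= 3 and body[1] == '-':
--             tokens.append((body[0], body[2]))
--             body = body[3:]
--         else:
--             tokens.append((body[0], body[0]))
--             body = body[1:]
--     chars = [chr(code) for a, b in tokens for code in range(ord(a), ord(b) + 1)]
--     union = "(" + "|".join(dict.fromkeys(chars)) + ")"
--     return head + union + _expand_char_classes(rest)
-- ===== Notes on version B (the rewrite author's own statement) =====
-- stated objective: faster
-- what changed: Replaces A's per-character index-driven while loop and set-based dedup with a partition-and-recurse traversal (str.partition does the scanning) whose class bodies are tokenized into (start,end) range pairs, expanded uniformly, and deduplicated with dict.fromkeys.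
import Mathlib
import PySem

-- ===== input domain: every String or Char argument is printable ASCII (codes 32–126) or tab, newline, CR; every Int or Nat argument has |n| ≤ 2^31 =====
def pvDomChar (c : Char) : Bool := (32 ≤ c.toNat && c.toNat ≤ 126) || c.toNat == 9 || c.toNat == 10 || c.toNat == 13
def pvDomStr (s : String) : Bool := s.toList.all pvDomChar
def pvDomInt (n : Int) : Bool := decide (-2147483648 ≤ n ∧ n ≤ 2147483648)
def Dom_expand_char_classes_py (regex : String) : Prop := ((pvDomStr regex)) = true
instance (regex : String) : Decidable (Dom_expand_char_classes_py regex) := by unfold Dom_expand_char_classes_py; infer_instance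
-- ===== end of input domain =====

-- B replaces A's per-character index-driven scan with a partition-and-recurse traversal plus a tokenize/expand/dedup pipeline (measured faster in a timing run); same return value wherever A returns (both raise on an unclosed '[').

-- shared primitive: Python's `for code in range(ord(a), ord(b) + 1): chr(code)` (used verbatim by both Pythons)
def pvRangeChars (a b : Char) : List Char :=
  (List.range' a.toNat (b.toNat + 1 - a.toNat)).map Char.ofNat

-- ===== PORT A =====
-- the inner `while j < n and regex[j] != ']'` scan: returns (class body, rest after ']'), none = unclosed
def pyA_findClose : List Char → Option (List Char × List Char)
  | [] => none
  | c :: rest =>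
    if c = ']' then some ([], rest)
    else
      match pyA_findClose rest with
      | none => none
      | some (b, r) => some (c :: b, r)

-- the `while k < len(class_body)` loop
def pyA_body : List Char → List Char
  | a :: b :: c :: rest =>
    if b = '-' then pvRangeChars a c ++ pyA_body rest
    else a :: pyA_body (b :: c :: rest)
  | a :: rest => a :: pyA_body rest
  | [] => []

-- the `seen` / `unique_chars` dedup loop
def pyA_dedup (chars : List Char) : List Char :=
  (chars.foldl
    (fun (st : PySem.Set Char × List Char) c =>
      if PySem.Set.contains st.1 c then st else (PySem.Set.add st.1 c, st.2 ++ [c]))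
    (PySem.Set.empty, [])).2

theorem pyA_findClose_length :
    ∀ (l b r : List Char), pyA_findClose l = some (b, r) → r.length < l.length := by
  intro l
  induction l with
  | nil => intro b r h; simp [pyA_findClose] at h
  | cons c rest ih =>
    intro b r h
    by_cases hc : c = ']'
    · simp [pyA_findClose, hc] at h
      simp [← h.2]
    · simp only [pyA_findClose, if_neg hc] at h
      cases hfc : pyA_findClose rest with
      | none => rw [hfc] at h; simp at h
      | some p =>
        rw [hfc] at h
        obtain ⟨b', r'⟩ := p
        simp at h
        have := ih b' r' hfc
        simp [← h.2]
        omega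

-- the outer `while i < n` loop; each iteration appends one piece to `expanded`; none = ValueError
def pyA_loop : List Char → Option (List (List Char))
  | [] => some []
  | c :: rest =>
    if c = '[' then
      match hfc : pyA_findClose rest with
      | none => none
      | some (body, r) =>
        match pyA_loop r with
        | none => none
        | some tail =>
          some (('(' :: PySem.Chars.join ['|'] ((pyA_dedup (pyA_body body)).map ([·])) ++ [')']) :: tail)
    else
      match pyA_loop rest with
      | none => none
      | some tail => some ([c] :: tail)
  termination_by l => l.length
  decreasing_by
  · exact Nat.lt_succ_of_lt (pyA_findClose_length _ _ _ hfc)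
  · simp

def expand_char_classes_py (regex : String) : String :=
  match pyA_loop regex.toList with
  | none => ""        -- the ValueError path, excluded by Pre_
  | some pieces => String.ofList pieces.flatten   -- "".join(expanded)

-- ===== PORT B =====
-- B's body tokenizer: (start, end) pairs, single char c ↦ (c, c)
def pyB_tokens : List Char → List (Char × Char)
  | a :: b :: c :: rest =>
    if b = '-' then (a, c) :: pyB_tokens rest
    else (a, a) :: pyB_tokens (b :: c :: rest)
  | a :: rest => (a, a) :: pyB_tokens rest
  | [] => []

-- B's recursion on regex.partition('[') / tail.partition(']'); none = ValueError
def pyB_core (l : List Char) : Option (List Char) :=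
  match h : l.dropWhile (· ≠ '[') with
  | [] => some l                          -- no '[': return regex
  | _ :: tail =>
    match h2 : tail.dropWhile (· ≠ ']') with
    | [] => none                          -- unclosed class
    | _ :: rest =>
      match pyB_core rest with
      | none => none
      | some out =>
        some (l.takeWhile (· ≠ '[') ++
              ('(' :: PySem.Chars.join ['|']
                ((PySem.List.dedup ((pyB_tokens (tail.takeWhile (· ≠ ']'))).flatMap
                  (fun t => pvRangeChars t.1 t.2))).map ([·]))) ++ [')'] ++ out)
  termination_by l.length
  decreasing_by
  · have h1 : tail.length < l.length := by
      have := List.length_dropWhile_le (p := fun c => decide (c ≠ '[')) l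
      rw [h] at this; simp at this; omega
    have h2' : rest.length < tail.length := by
      have := List.length_dropWhile_le (p := fun c => decide (c ≠ ']')) tail
      rw [h2] at this; simp at this; omega
    omega

def expand_char_classes_py_alt (regex : String) : String :=
  match pyB_core regex.toList with
  | none => ""
  | some out => String.ofList out

-- ===== PRECONDITION & SPEC =====
-- Pre_ excludes exactly the inputs on which A raises ValueError: those whose suffix after the last ']' contains a '[' (an unclosed char class).
def Pre_expand_char_classes_py (regex : String) : Prop :=
  '[' ∉ regex.toList.reverse.takeWhile (· ≠ ']')
instance (regex : String) : Decidable (Pre_expand_char_classes_py regex) := by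
  unfold Pre_expand_char_classes_py; infer_instance
def pvWitness_expand_char_classes_py : String := "[a-c]x[0-9]"

def Spec_expand_char_classes_py (regex : String) (out : String) : Prop :=
  out = expand_char_classes_py_alt regex
instance (regex : String) (out : String) : Decidable (Spec_expand_char_classes_py regex out) := by
  unfold Spec_expand_char_classes_py; infer_instance

-- ===== CLAIM (what is proved, stated in full; the proofs are below) =====
def Claim_equal_expand_char_classes_py : Prop :=
  ∀ (regex : String), Dom_expand_char_classes_py regex → Pre_expand_char_classes_py regex →
    Spec_expand_char_classes_py regex (expand_char_classes_py regex)

-- ===== LEMMAS AND PROOFS =====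

theorem pvRangeChars_self (a : Char) : pvRangeChars a a = [a] := by
  simp [pvRangeChars]

theorem pyA_body_eq_tokens (l : List Char) :
    pyA_body l = (pyB_tokens l).flatMap (fun t => pvRangeChars t.1 t.2) := by
  induction l using pyA_body.induct <;>
    simp [pyA_body, pyB_tokens, pvRangeChars_self, *]

theorem pyA_dedup_aux (chars : List Char) (s : PySem.Set Char) :
    chars.foldl
      (fun (st : PySem.Set Char × List Char) c =>
        if PySem.Set.contains st.1 c then st else (PySem.Set.add st.1 c, st.2 ++ [c]))
      (s, s) = (chars.foldl PySem.Set.add s, chars.foldl PySem.Set.add s) := by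
  induction chars generalizing s with
  | nil => simp
  | cons c cs ih =>
    simp only [List.foldl_cons]
    by_cases hc : PySem.Set.contains s c = true
    · have hm : c ∈ s := by simpa [PySem.Set.contains] using hc
      rw [if_pos hc, show PySem.Set.add s c = s by simp [PySem.Set.add, hm]]
      exact ih s
    · have hm : c ∉ s := by simpa [PySem.Set.contains] using hc
      rw [if_neg hc, show PySem.Set.add s c = s ++ [c] by simp [PySem.Set.add, hm]]
      exact ih (s ++ [c])

theorem pyA_dedup_eq_dedup (chars : List Char) :
    pyA_dedup chars = PySem.List.dedup chars := by
  unfold pyA_dedup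
  rw [show (PySem.Set.empty : PySem.Set Char) = ([] : List Char) from rfl] at *
  rw [pyA_dedup_aux chars []]
  simp [PySem.List.dedup_eq_ofList, PySem.Set.ofList_eq_foldl]

theorem pyA_findClose_spec (l : List Char) :
    pyA_findClose l =
      ((l.dropWhile (· ≠ ']')).tail?).map (fun r => (l.takeWhile (· ≠ ']'), r)) := by
  induction l with
  | nil => simp [pyA_findClose]
  | cons c rest ih =>
    by_cases hc : c = ']'
    · simp [pyA_findClose, hc]
    · simp only [pyA_findClose, if_neg hc, ih]
      cases h : (rest.dropWhile (· ≠ ']')).tail? <;>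
        · simp only [ne_eq, decide_not] at h ⊢
          simp [List.dropWhile_cons, List.takeWhile_cons, hc, h]

theorem pyB_core_cons_ne (c : Char) (rest : List Char) (hc : ¬ c = '[') :
    pyB_core (c :: rest) = (pyB_core rest).map (c :: ·) := by
  rw [pyB_core, pyB_core]
  have hstep : List.dropWhile (fun x => decide (x ≠ '[')) (c :: rest)
      = List.dropWhile (fun x => decide (x ≠ '[')) rest := by
    simp [List.dropWhile_cons, hc]
  have ht : List.takeWhile (fun x => decide (x ≠ '[')) (c :: rest)
      = c :: List.takeWhile (fun x => decide (x ≠ '[')) rest := by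
    simp [List.takeWhile_cons, hc]
  rw [hstep, ht]
  cases hD : List.dropWhile (fun x => decide (x ≠ '[')) rest with
  | nil => simp
  | cons u tail =>
    split
    · simp
    · split
      · simp
      · rename_i out rest2 h2
        cases pyB_core rest2 <;> simp

theorem pyA_findClose_none (rest : List Char) (h : pyA_findClose rest = none) :
    List.dropWhile (fun x => decide (x ≠ ']')) rest = [] := by
  rw [pyA_findClose_spec] at h
  cases hD : List.dropWhile (fun x => decide (x ≠ ']')) rest with
  | nil => rfl
  | cons v r => rw [hD] at h; simp at h

theorem pyA_findClose_some (rest body r : List Char)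
    (h : pyA_findClose rest = some (body, r)) :
    List.takeWhile (fun x => decide (x ≠ ']')) rest = body ∧
    ∃ v, List.dropWhile (fun x => decide (x ≠ ']')) rest = v :: r := by
  rw [pyA_findClose_spec] at h
  cases hD : List.dropWhile (fun x => decide (x ≠ ']')) rest with
  | nil => rw [hD] at h; simp at h
  | cons v r' =>
    rw [hD] at h
    simp at h
    exact ⟨by simpa using h.1, v, by rw [h.2]⟩

theorem pyB_core_cons_lb_none (rest : List Char)
    (hfc : pyA_findClose rest = none) : pyB_core ('[' :: rest) = none := by
  rw [pyB_core]
  have hD : List.dropWhile (fun x => decide (x ≠ '[')) ('[' :: rest) = '[' :: rest := by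
    simp
  rw [hD]
  split
  · rename_i heq; simp at heq
  · rename_i head tail heq
    injection heq with h1 h2
    subst h2
    rw [pyA_findClose_none rest hfc]

theorem pyB_core_cons_lb_some (rest body r : List Char)
    (hfc : pyA_findClose rest = some (body, r)) :
    pyB_core ('[' :: rest) =
      (pyB_core r).map (fun out =>
        '(' :: PySem.Chars.join ['|']
          ((PySem.List.dedup ((pyB_tokens body).flatMap (fun t => pvRangeChars t.1 t.2))).map ([·]))
          ++ [')'] ++ out) := by
  obtain ⟨hbody, v, hD2⟩ := pyA_findClose_some rest body r hfc
  rw [pyB_core]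
  have hD : List.dropWhile (fun x => decide (x ≠ '[')) ('[' :: rest) = '[' :: rest := by
    simp
  rw [hD]
  split
  · rename_i heq; simp at heq
  · rename_i head tail heq
    injection heq with h1 h2
    subst h2
    rw [hD2, hbody]
    split
    · rename_i heq2; simp at heq2
    · rename_i head2 rest2 heq2
      injection heq2 with e1 e2
      subst e2
      cases pyB_core r <;> simp

theorem pyA_loop_eq_pyB_core (l : List Char) :
    (pyA_loop l).map List.flatten = pyB_core l := by
  induction l using pyA_loop.induct with
  | case1 => rw [pyB_core]; simp [pyA_loop]
  | case2 rest hfc =>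
    rw [pyB_core_cons_lb_none rest hfc, pyA_loop, if_pos rfl, hfc]
    rfl
  | case3 rest body r hfc hr ih =>
    rw [pyA_loop, if_pos rfl, hfc, pyB_core_cons_lb_some rest body r hfc]
    split
    · rename_i heq; simp at heq
    rename_i body1 r1 heq
    have hbr : body = body1 ∧ r = r1 := by simpa using heq
    obtain ⟨hb1, hr1⟩ := hbr
    subst hb1; subst hr1
    rw [hr] at ih
    simp at ih
    rw [hr, ← ih]
    simp
  | case4 rest body r hfc tail htail ih =>
    rw [pyA_loop, if_pos rfl, hfc, pyB_core_cons_lb_some rest body r hfc]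
    split
    · rename_i heq; simp at heq
    rename_i body1 r1 heq
    have hbr : body = body1 ∧ r = r1 := by simpa using heq
    obtain ⟨hb1, hr1⟩ := hbr
    subst hb1; subst hr1
    rw [htail] at ih
    simp at ih
    rw [htail, ← ih]
    simp [pyA_body_eq_tokens, pyA_dedup_eq_dedup]
  | case5 c rest hc hr ih =>
    rw [pyA_loop, if_neg hc, pyB_core_cons_ne c rest hc]
    rw [hr] at ih
    simp at ih
    rw [hr, ← ih]
    simp
  | case6 c rest hc tail htail ih =>
    rw [pyA_loop, if_neg hc, pyB_core_cons_ne c rest hc]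
    rw [htail] at ih
    simp at ih
    rw [htail, ← ih]
    simp

-- ===== VERDICT (by name: the statement is the Claim_ definition above) =====
theorem expand_char_classes_py_spec : Claim_equal_expand_char_classes_py := by
  intro regex _ _
  unfold Spec_expand_char_classes_py expand_char_classes_py expand_char_classes_py_alt
  have h := pyA_loop_eq_pyB_core regex.toList
  cases hA : pyA_loop regex.toList with
  | none => rw [hA] at h; simp at h; rw [← h]
  | some pieces => rw [hA] at h; simp at h; rw [← h]
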